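-- pv_equiv track=rewrite | github.com/QQ314958617/jiaoyi | openclaw/range.py | range_inclusive
-- ===== SOURCE A (Python) =====
-- from typing import Generator, List
--
-- def range_inclusive(start: int, end: int, step: int = 1) -> List[int]:
--     """
--     包含性range
--
--     Args:
--         start: 起始值(包含)
--         end: 结束值(包含)
--         step: 步长
--
--     Returns:
--         数字列表
--     """
--     result = []
--     current = start
--
--     if step > 0:
--         while current <= end:
--             result.append(current)
--             current += step
--     elif step < 0:
--         while current >= end:
--             result.append(current)
--             current += step
--
--     return result
-- ===== SOURCE B (Python) =====
-- def range_inclusive(start: int, end: int, step: int = 1):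
--     """Closed-form: compute the term count once, then emit one counted pass."""
--     if step == 0:
--         return []
--     n = (end - start) // step + 1
--     if n < 0:
--         n = 0
--     return [start + i * step for i in range(n)]
-- ===== Notes on version B (the rewrite author's own statement) =====
-- stated objective: alternative
-- what changed: Replaces the boundary-tested while loop with a closed-form term count (floor division) followed by a single counted comprehension.
import Mathlib
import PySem

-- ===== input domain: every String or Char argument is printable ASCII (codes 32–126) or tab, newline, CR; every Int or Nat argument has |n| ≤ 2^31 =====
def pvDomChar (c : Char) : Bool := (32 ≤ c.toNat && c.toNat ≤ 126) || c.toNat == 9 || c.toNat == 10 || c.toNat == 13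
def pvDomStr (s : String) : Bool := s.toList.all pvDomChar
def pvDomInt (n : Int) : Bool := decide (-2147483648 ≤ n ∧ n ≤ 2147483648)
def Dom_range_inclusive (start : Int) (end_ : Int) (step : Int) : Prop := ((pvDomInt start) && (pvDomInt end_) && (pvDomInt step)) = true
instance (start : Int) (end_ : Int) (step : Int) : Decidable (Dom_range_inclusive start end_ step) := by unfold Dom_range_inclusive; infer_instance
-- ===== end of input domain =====

-- B replaces A's boundary-tested while loop by a closed-form term count plus one counted pass (alternative decomposition, same cost).

-- ===== PORT A =====
-- `while current <= end: result.append(current); current += step`  (step > 0)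
def rangeIncLoopUp (end_ step : Int) (h : 0 < step) (current : Int) (result : List Int) : List Int :=
  if current ≤ end_ then
    rangeIncLoopUp end_ step h (current + step) (result ++ [current])
  else result
termination_by (end_ + 1 - current).toNat
decreasing_by omega

-- `while current >= end: result.append(current); current += step`  (step < 0)
def rangeIncLoopDown (end_ step : Int) (h : step < 0) (current : Int) (result : List Int) : List Int :=
  if current ≥ end_ then
    rangeIncLoopDown end_ step h (current + step) (result ++ [current])
  else result
termination_by (current + 1 - end_).toNat
decreasing_by omega

def range_inclusive (start : Int) (end_ : Int) (step : Int) : List Int :=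
  if h : 0 < step then rangeIncLoopUp end_ step h start []
  else if h' : step < 0 then rangeIncLoopDown end_ step h' start []
  else []

-- ===== PORT B =====
def range_inclusive_alt (start : Int) (end_ : Int) (step : Int) : List Int :=
  if step = 0 then []
  else
    let n := PySem.Int.floordiv (end_ - start) step + 1
    let n := if n < 0 then 0 else n
    (List.range n.toNat).map (fun (i : Nat) => start + (i : Int) * step)

-- ===== PRECONDITION & SPEC =====
def Spec_range_inclusive (start : Int) (end_ : Int) (step : Int) (out : List Int) : Prop := out = range_inclusive_alt start end_ step
instance (start : Int) (end_ : Int) (step : Int) (out : List Int) : Decidable (Spec_range_inclusive start end_ step out) := by unfold Spec_range_inclusive; infer_instance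

-- ===== CLAIM (what is proved, stated in full; the proofs are below) =====
def Claim_equal_range_inclusive : Prop := ∀ (start : Int) (end_ : Int) (step : Int), Dom_range_inclusive start end_ step → Spec_range_inclusive start end_ step (range_inclusive start end_ step)

-- ===== LEMMAS AND PROOFS =====

-- floor-division sign facts (floordiv = Int.fdiv), via floordiv_mul_add_mod and the mod bounds
theorem fd_nonneg_of_pos (a step : Int) (h : 0 < step) (ha : 0 ≤ a) :
    0 ≤ PySem.Int.floordiv a step := by
  have h1 := PySem.Int.floordiv_mul_add_mod a step
  have h2 := PySem.Int.mod_lt a h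
  nlinarith [PySem.Int.mod_nonneg a h]

theorem fd_neg_of_pos (a step : Int) (h : 0 < step) (ha : a < 0) :
    PySem.Int.floordiv a step < 0 := by
  have h1 := PySem.Int.floordiv_mul_add_mod a step
  have h2 := PySem.Int.mod_nonneg a h
  nlinarith

theorem fd_nonneg_of_neg (a step : Int) (h : step < 0) (ha : a ≤ 0) :
    0 ≤ PySem.Int.floordiv a step := by
  have h1 := PySem.Int.floordiv_mul_add_mod a step
  have h2 := (PySem.Int.mod_neg_bounds a h).1
  nlinarith

theorem fd_neg_of_neg (a step : Int) (h : step < 0) (ha : 0 < a) :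
    PySem.Int.floordiv a step < 0 := by
  have h1 := PySem.Int.floordiv_mul_add_mod a step
  have h2 := (PySem.Int.mod_neg_bounds a h).2
  nlinarith

theorem fd_sub_step (a step : Int) (h : step ≠ 0) :
    PySem.Int.floordiv (a - step) step = PySem.Int.floordiv a step - 1 := by
  show Int.fdiv _ _ = _
  rw [show a - step = a + (-1) * step by ring, Int.add_mul_fdiv_right a (-1) h]
  rfl

theorem range_shift (current step : Int) (k : Nat) :
    (List.range (k + 1)).map (fun (i : Nat) => current + (i : Int) * step) =
      current :: (List.range k).map (fun (i : Nat) => (current + step) + (i : Int) * step) := by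
  rw [List.range_succ_eq_map, List.map_cons, List.map_map]
  congr 1
  · push_cast
    ring
  · apply List.map_congr_left
    intro i _
    simp only [Function.comp_apply]
    push_cast
    ring

theorem loopUp_eq (end_ step : Int) (h : 0 < step) (current : Int) (acc : List Int) :
    rangeIncLoopUp end_ step h current acc =
      acc ++ (List.range (PySem.Int.floordiv (end_ - current) step + 1).toNat).map
        (fun (i : Nat) => current + (i : Int) * step) := by
  fun_induction rangeIncLoopUp with
  | case1 current acc hle ih =>
      have hrec : PySem.Int.floordiv (end_ - (current + step)) step
          = PySem.Int.floordiv (end_ - current) step - 1 := by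
        rw [show end_ - (current + step) = (end_ - current) - step by ring,
          fd_sub_step _ _ (by omega)]
      have hnn : 0 ≤ PySem.Int.floordiv (end_ - current) step :=
        fd_nonneg_of_pos _ _ h (by omega)
      rw [ih]
      have hk : (PySem.Int.floordiv (end_ - current) step + 1).toNat
          = (PySem.Int.floordiv (end_ - (current + step)) step + 1).toNat + 1 := by
        omega
      rw [hk, range_shift, List.append_assoc]
      rfl
  | case2 current acc hgt =>
      have hneg : PySem.Int.floordiv (end_ - current) step < 0 :=
        fd_neg_of_pos _ _ h (by omega)
      have : (PySem.Int.floordiv (end_ - current) step + 1).toNat = 0 := by omega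
      simp [this]

theorem loopDown_eq (end_ step : Int) (h : step < 0) (current : Int) (acc : List Int) :
    rangeIncLoopDown end_ step h current acc =
      acc ++ (List.range (PySem.Int.floordiv (end_ - current) step + 1).toNat).map
        (fun (i : Nat) => current + (i : Int) * step) := by
  fun_induction rangeIncLoopDown with
  | case1 current acc hge ih =>
      have hrec : PySem.Int.floordiv (end_ - (current + step)) step
          = PySem.Int.floordiv (end_ - current) step - 1 := by
        rw [show end_ - (current + step) = (end_ - current) - step by ring,
          fd_sub_step _ _ (by omega)]
      have hnn : 0 ≤ PySem.Int.floordiv (end_ - current) step :=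
        fd_nonneg_of_neg _ _ h (by omega)
      rw [ih]
      have hk : (PySem.Int.floordiv (end_ - current) step + 1).toNat
          = (PySem.Int.floordiv (end_ - (current + step)) step + 1).toNat + 1 := by
        omega
      rw [hk, range_shift, List.append_assoc]
      rfl
  | case2 current acc hlt =>
      have hneg : PySem.Int.floordiv (end_ - current) step < 0 :=
        fd_neg_of_neg _ _ h (by omega)
      have : (PySem.Int.floordiv (end_ - current) step + 1).toNat = 0 := by omega
      simp [this]

theorem alt_toNat (start end_ step : Int) (h : step ≠ 0) :
    range_inclusive_alt start end_ step =
      (List.range (PySem.Int.floordiv (end_ - start) step + 1).toNat).map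
        (fun (i : Nat) => start + (i : Int) * step) := by
  unfold range_inclusive_alt
  rw [if_neg h]
  by_cases hn : PySem.Int.floordiv (end_ - start) step + 1 < 0
  · have : (PySem.Int.floordiv (end_ - start) step + 1).toNat = 0 := by omega
    simp [hn, this]
  · simp [hn]

-- ===== VERDICT (by name: the statement is the Claim_ definition above) =====
theorem range_inclusive_spec : Claim_equal_range_inclusive := by
  intro start end_ step _
  unfold Spec_range_inclusive range_inclusive
  by_cases h : 0 < step
  · rw [dif_pos h, loopUp_eq, alt_toNat _ _ _ (by omega), List.nil_append]
  · rw [dif_neg h]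
    by_cases h' : step < 0
    · rw [dif_pos h', loopDown_eq, alt_toNat _ _ _ (by omega), List.nil_append]
    · rw [dif_neg h']
      have : step = 0 := by omega
      simp [range_inclusive_alt, this]
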